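-- pv_equiv track=rewrite | github.com/H-Rusch/AdventOfCode-Python | 2019/day24/day24.py | calculate_biodiversity
-- ===== SOURCE A (Python) =====
-- def calculate_biodiversity(bugs: set) -> int:
--     score = 0
--     value = 1
--
--     for y in range(5):
--         for x in range(5):
--             if (x, y) in bugs:
--                 score += value
--             value *= 2
--
--     return score
-- ===== SOURCE B (Python) =====
-- def calculate_biodiversity(bugs: set) -> int:
--     # simpler: iterate the bug coordinates themselves, each in-range bug
--     # contributes the bit 2**(x + 5*y); no scan over all 25 cells.
--     return sum(2 ** (x + 5 * y) for (x, y) in bugs if 0 <= x < 5 and 0 <= y < 5)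
-- ===== Notes on version B (the rewrite author's own statement) =====
-- stated objective: simpler
-- what changed: Instead of scanning all 25 grid cells with a doubling place-value accumulator and testing membership of each cell in the set, B iterates over the bug coordinates themselves and sums 2**(x+5*y) for each in-range bug.
import Mathlib
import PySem

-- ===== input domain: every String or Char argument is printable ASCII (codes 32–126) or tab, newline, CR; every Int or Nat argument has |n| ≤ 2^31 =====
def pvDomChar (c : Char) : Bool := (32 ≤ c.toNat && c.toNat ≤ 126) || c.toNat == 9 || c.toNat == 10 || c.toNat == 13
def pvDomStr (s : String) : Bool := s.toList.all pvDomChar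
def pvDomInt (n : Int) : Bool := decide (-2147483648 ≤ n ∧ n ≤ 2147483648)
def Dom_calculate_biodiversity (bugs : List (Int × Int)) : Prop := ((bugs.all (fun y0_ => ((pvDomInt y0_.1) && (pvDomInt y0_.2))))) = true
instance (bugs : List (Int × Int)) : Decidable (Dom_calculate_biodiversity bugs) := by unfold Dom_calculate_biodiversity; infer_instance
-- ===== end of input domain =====

-- B replaces A's scan of all 25 cells (with a doubling place-value accumulator) by a
-- sum of 2^(x+5*y) over the in-range bug coordinates themselves (objective: simpler).

-- ===== PORT A =====
def calculate_biodiversity (bugs : List (Int × Int)) : Int :=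
  -- score = 0; value = 1; for y in range(5): for x in range(5): ...
  ((PySem.List.pyRange 0 5 1).foldl (fun (s : Int × Int) y =>
      (PySem.List.pyRange 0 5 1).foldl (fun (t : Int × Int) x =>
        (if bugs.contains (x, y) then t.1 + t.2 else t.1, t.2 * 2)) s)
    ((0 : Int), (1 : Int))).1

-- ===== PORT B =====
def calculate_biodiversity_alt (bugs : List (Int × Int)) : Int :=
  -- sum(2 ** (x + 5 * y) for (x, y) in bugs if 0 <= x < 5 and 0 <= y < 5)
  ((bugs.filter (fun p => decide (0 ≤ p.1 ∧ p.1 < 5 ∧ 0 ≤ p.2 ∧ p.2 < 5))).map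
    (fun p => (2 : Int) ^ (p.1 + 5 * p.2).toNat)).sum

-- ===== PRECONDITION & SPEC =====
-- The Python argument is a SET; its List model holds distinct elements. Pre_ only states
-- that representation invariant (no duplicate pairs); it excludes no Python input.
def Pre_calculate_biodiversity (bugs : List (Int × Int)) : Prop := bugs.Nodup
instance (bugs : List (Int × Int)) : Decidable (Pre_calculate_biodiversity bugs) := by
  unfold Pre_calculate_biodiversity; infer_instance
def pvWitness_calculate_biodiversity : (List (Int × Int)) := [(0, 0), (3, 1), (7, -2)]
def Spec_calculate_biodiversity (bugs : List (Int × Int)) (out : Int) : Prop := out = calculate_biodiversity_alt bugs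
instance (bugs : List (Int × Int)) (out : Int) : Decidable (Spec_calculate_biodiversity bugs out) := by unfold Spec_calculate_biodiversity; infer_instance

-- ===== CLAIM (what is proved, stated in full; the proofs are below) =====
def Claim_equal_calculate_biodiversity : Prop := ∀ (bugs : List (Int × Int)), Dom_calculate_biodiversity bugs → Pre_calculate_biodiversity bugs → Spec_calculate_biodiversity bugs (calculate_biodiversity bugs)

-- ===== LEMMAS AND PROOFS =====

-- the 25 grid cells in A's visiting order (x fast, y slow)
def pvCells : List (Int × Int) :=
  [(0,0),(1,0),(2,0),(3,0),(4,0),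
   (0,1),(1,1),(2,1),(3,1),(4,1),
   (0,2),(1,2),(2,2),(3,2),(4,2),
   (0,3),(1,3),(2,3),(3,3),(4,3),
   (0,4),(1,4),(2,4),(3,4),(4,4)]

theorem pv_ite_push (c : Bool) (s v : Int) :
    (if c then s + v else s) = s + (if c then v else 0) := by cases c <;> simp

theorem pvA_eq_sum (bugs : List (Int × Int)) :
    calculate_biodiversity bugs =
      (pvCells.map (fun c => if bugs.contains c then (2 : Int) ^ (c.1 + 5 * c.2).toNat else 0)).sum := by
  have h5 : PySem.List.pyRange 0 5 1 = [0, 1, 2, 3, 4] := by decide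
  simp only [calculate_biodiversity, h5, List.foldl, pvCells, List.map, List.sum_cons,
    List.sum_nil, pv_ite_push]
  norm_num
  simp only [add_assoc]
  simp only [show ((2:Int)).toNat = 2 from rfl, show ((3:Int)).toNat = 3 from rfl,
    show ((4:Int)).toNat = 4 from rfl, show ((5:Int)).toNat = 5 from rfl,
    show ((6:Int)).toNat = 6 from rfl, show ((7:Int)).toNat = 7 from rfl,
    show ((8:Int)).toNat = 8 from rfl, show ((9:Int)).toNat = 9 from rfl,
    show ((10:Int)).toNat = 10 from rfl, show ((11:Int)).toNat = 11 from rfl,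
    show ((12:Int)).toNat = 12 from rfl, show ((13:Int)).toNat = 13 from rfl,
    show ((14:Int)).toNat = 14 from rfl, show ((15:Int)).toNat = 15 from rfl,
    show ((16:Int)).toNat = 16 from rfl, show ((17:Int)).toNat = 17 from rfl,
    show ((18:Int)).toNat = 18 from rfl, show ((19:Int)).toNat = 19 from rfl,
    show ((20:Int)).toNat = 20 from rfl, show ((21:Int)).toNat = 21 from rfl,
    show ((22:Int)).toNat = 22 from rfl, show ((23:Int)).toNat = 23 from rfl,
    show ((24:Int)).toNat = 24 from rfl]
  norm_num

theorem pv_sum_map_ite {α : Type} (l : List α) (p : α → Bool) (w : α → Int) :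
    (l.map fun c => if p c then w c else 0).sum = ((l.filter p).map w).sum := by
  induction l with
  | nil => rfl
  | cons a l ih => by_cases h : p a <;> simp [h, ih]

set_option maxHeartbeats 1000000 in
theorem pv_mem_cells (x y : Int) :
    (x, y) ∈ pvCells ↔ (0 ≤ x ∧ x < 5 ∧ 0 ≤ y ∧ y < 5) := by
  constructor
  · intro h
    fin_cases h <;> norm_num
  · rintro ⟨hx0, hx5, hy0, hy5⟩
    interval_cases x <;> interval_cases y <;> decide

theorem pv_cells_nodup : pvCells.Nodup := by decide

theorem calculate_biodiversity_eq (bugs : List (Int × Int)) (hnd : bugs.Nodup) :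
    calculate_biodiversity bugs = calculate_biodiversity_alt bugs := by
  rw [pvA_eq_sum, pv_sum_map_ite]
  refine List.Perm.sum_eq (List.Perm.map _ ?_)
  refine (List.perm_ext_iff_of_nodup (pv_cells_nodup.filter _) (hnd.filter _)).2 ?_
  rintro ⟨x, y⟩
  simp [List.mem_filter, pv_mem_cells]
  tauto

-- ===== VERDICT (by name: the statement is the Claim_ definition above) =====
theorem calculate_biodiversity_spec : Claim_equal_calculate_biodiversity := by
  intro bugs _ hpre
  unfold Spec_calculate_biodiversity
  exact calculate_biodiversity_eq bugs hpre
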